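-- pv_equiv track=rewrite | github.com/luke-avionics/autoai2c | pre-rf/ev_util.py | gen_net_arch
-- ===== SOURCE A (Python) =====
-- import copy
--
-- def gen_net_arch(df_order,dnn):
--     net_arch=copy.deepcopy(dnn)
--     for i in df_order:
--         if 'ch_out' in i:
--             for layer in range(len(dnn)):
--                 net_arch[layer][1]['ch_out'][1]+=1
--         elif 'ch_in' in i:
--             for layer in range(len(dnn)):
--                 net_arch[layer][1]['ch_in'][1]+=1
--         elif 'batch' in i:
--             for layer in range(len(dnn)):
--                 net_arch[layer][1]['batch'][1]+=1
--         elif 'col_out' in i: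
--             for layer in range(len(dnn)):
--                 net_arch[layer][1]['col_out'][1]+=1
--         elif 'row_out' in i:
--             for layer in range(len(dnn)):
--                 net_arch[layer][1]['row_out'][1]+=1
--         elif 'row_kernel' in i:
--             for layer in range(len(dnn)):
--                 net_arch[layer][1]['row_kernel'][1]+=1
--         elif 'col_kernel' in i:
--             for layer in range(len(dnn)):
--                 net_arch[layer][1]['col_kernel'][1]+=1
--     return net_arch
-- ===== SOURCE B (Python) =====
-- def gen_net_arch(df_order, dnn):
--     keys = ('ch_out', 'ch_in', 'batch', 'col_out', 'row_out', 'row_kernel', 'col_kernel')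
--     counts = dict.fromkeys(keys, 0)
--     for i in df_order:
--         for k in keys:
--             if k in i:
--                 counts[k] += 1
--                 break
--     def bump(d):
--         return {k: ([v[0], v[1] + counts[k]] + v[2:] if counts.get(k, 0) else list(v))
--                 for k, v in d.items()}
--     return [(name, bump(d)) for name, d in dnn]
-- ===== Notes on version B (the rewrite author's own statement) =====
-- stated objective: faster
-- what changed: B classifies each df_order entry once into a per-key counter and then adds each count to every layer in a single pass, instead of A's rescan of all layers for every df_order entry.
import Mathlib
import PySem

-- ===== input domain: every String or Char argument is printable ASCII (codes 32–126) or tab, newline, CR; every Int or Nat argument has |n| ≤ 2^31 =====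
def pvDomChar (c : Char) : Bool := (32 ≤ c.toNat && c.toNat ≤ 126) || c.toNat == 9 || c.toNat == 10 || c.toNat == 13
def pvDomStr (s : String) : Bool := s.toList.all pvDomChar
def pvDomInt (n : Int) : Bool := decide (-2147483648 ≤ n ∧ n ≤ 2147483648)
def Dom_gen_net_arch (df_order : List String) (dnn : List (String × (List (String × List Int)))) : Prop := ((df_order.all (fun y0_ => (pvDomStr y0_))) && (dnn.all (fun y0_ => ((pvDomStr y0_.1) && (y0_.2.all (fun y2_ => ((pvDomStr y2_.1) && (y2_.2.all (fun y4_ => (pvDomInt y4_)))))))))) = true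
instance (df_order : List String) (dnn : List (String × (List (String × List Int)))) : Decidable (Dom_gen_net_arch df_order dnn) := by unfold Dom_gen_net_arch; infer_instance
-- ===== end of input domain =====

-- B replaces A's rescan of all layers per df_order entry by one per-key counter pass plus one
-- pass over the layers (objective: faster; A does not mutate its arguments — it deepcopies dnn).

-- ===== PORT A =====
-- 'lst[1] += 1' on the value list; where Python would raise IndexError (len < 2) the input is outside Pre_.
def pvInc1 (l : List Int) : List Int :=
  match l with
  | a :: b :: r => a :: (b + 1) :: r
  | l => l

-- "net_arch[layer][1][k][1] += 1": Python-dict update of key k (first matching entry of the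
-- association list); where Python would raise KeyError the input is outside Pre_.
def pvDinc (k : String) : List (String × List Int) → List (String × List Int)
  | [] => []
  | (k', v) :: r => if k' == k then (k', pvInc1 v) :: r else (k', v) :: pvDinc k r

-- Port of A. copy.deepcopy(dnn) is the value dnn itself (values are immutable here); each inner
-- 'for layer in range(len(dnn))' updates every layer (index) exactly once and is ported as a map
-- over the layers of the current net_arch (same length as dnn throughout).
def gen_net_arch (df_order : List String) (dnn : List (String × (List (String × List Int)))) : List (String × (List (String × List Int))) :=
  df_order.foldl (fun net_arch i =>
    if PySem.Str.isIn "ch_out" i then net_arch.map (fun l => (l.1, pvDinc "ch_out" l.2))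
    else if PySem.Str.isIn "ch_in" i then net_arch.map (fun l => (l.1, pvDinc "ch_in" l.2))
    else if PySem.Str.isIn "batch" i then net_arch.map (fun l => (l.1, pvDinc "batch" l.2))
    else if PySem.Str.isIn "col_out" i then net_arch.map (fun l => (l.1, pvDinc "col_out" l.2))
    else if PySem.Str.isIn "row_out" i then net_arch.map (fun l => (l.1, pvDinc "row_out" l.2))
    else if PySem.Str.isIn "row_kernel" i then net_arch.map (fun l => (l.1, pvDinc "row_kernel" l.2))
    else if PySem.Str.isIn "col_kernel" i then net_arch.map (fun l => (l.1, pvDinc "col_kernel" l.2))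
    else net_arch) dnn

-- ===== PORT B =====
def pvKeys : List String := ["ch_out", "ch_in", "batch", "col_out", "row_out", "row_kernel", "col_kernel"]

-- B's inner "for k in keys: if k in i: …; break" = first key occurring in i.
def pvClassify (i : String) : Option String := pvKeys.find? (fun k => PySem.Str.isIn k i)

-- B's "[v[0], v[1] + c] + v[2:]"; where Python would raise IndexError the input is outside Pre_.
def pvAddAt1 (c : Int) (v : List Int) : List Int :=
  match v with
  | a :: b :: r => a :: (b + c) :: r
  | v => v

def gen_net_arch_alt (df_order : List String) (dnn : List (String × (List (String × List Int)))) : List (String × (List (String × List Int))) :=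
  let counts := df_order.foldl (fun d i =>
      match pvClassify i with
      | some k => d.modify k 0 (· + 1)
      | none => d)
    (PySem.Dict.ofList (pvKeys.map (fun k => (k, (0 : Int)))))
  dnn.map (fun l => (l.1, l.2.map (fun kv =>
    if counts.getD kv.1 0 ≠ 0 then (kv.1, pvAddAt1 (counts.getD kv.1 0) kv.2) else kv)))

-- ===== PRECONDITION & SPEC =====
-- Pre_ = exactly the inputs where the Python A returns: whenever some df_order entry selects a key,
-- every layer's dict must contain that key with a value list of length ≥ 2 (else A raises
-- KeyError/IndexError).  The Nodup clause only excludes association lists with duplicate keys,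
-- which a Python dict cannot have, so it excludes no Python-reachable input.
def Pre_gen_net_arch (df_order : List String) (dnn : List (String × (List (String × List Int)))) : Prop :=
  (∀ l ∈ dnn, (l.2.map Prod.fst).Nodup) ∧
  (∀ i ∈ df_order, ((pvClassify i).all (fun k =>
      dnn.all (fun l => (l.2.lookup k).any (fun v => decide (2 ≤ v.length))))) = true)
instance (df_order : List String) (dnn : List (String × (List (String × List Int)))) : Decidable (Pre_gen_net_arch df_order dnn) := by unfold Pre_gen_net_arch; infer_instance

def pvWitness_gen_net_arch : List String × (List (String × (List (String × List Int)))) :=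
  (["ch_out_df", "K", "ch_in_dram"],
   [("conv1", [("ch_out", [1, 2]), ("ch_in", [3, 4]), ("batch", [0, 0])]),
    ("conv2", [("ch_out", [5, 6]), ("ch_in", [7, 8]), ("batch", [0, 1])])])

def Spec_gen_net_arch (df_order : List String) (dnn : List (String × (List (String × List Int)))) (out : List (String × (List (String × List Int)))) : Prop := out = gen_net_arch_alt df_order dnn
instance (df_order : List String) (dnn : List (String × (List (String × List Int)))) (out : List (String × (List (String × List Int)))) : Decidable (Spec_gen_net_arch df_order dnn out) := by unfold Spec_gen_net_arch; infer_instance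

-- ===== CLAIM (what is proved, stated in full; the proofs are below) =====
def Claim_equal_gen_net_arch : Prop := ∀ (df_order : List String) (dnn : List (String × (List (String × List Int)))), Dom_gen_net_arch df_order dnn → Pre_gen_net_arch df_order dnn → Spec_gen_net_arch df_order dnn (gen_net_arch df_order dnn)

-- ===== LEMMAS AND PROOFS =====

theorem pv_witness_ok :
    Dom_gen_net_arch pvWitness_gen_net_arch.1 pvWitness_gen_net_arch.2 ∧
    Pre_gen_net_arch pvWitness_gen_net_arch.1 pvWitness_gen_net_arch.2 := by
  decide

-- A's elif chain is: apply pvDinc (pvClassify i) to every layer.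
theorem pv_stepA_eq (na : List (String × (List (String × List Int)))) (i : String) :
    (if PySem.Str.isIn "ch_out" i then na.map (fun l => (l.1, pvDinc "ch_out" l.2))
     else if PySem.Str.isIn "ch_in" i then na.map (fun l => (l.1, pvDinc "ch_in" l.2))
     else if PySem.Str.isIn "batch" i then na.map (fun l => (l.1, pvDinc "batch" l.2))
     else if PySem.Str.isIn "col_out" i then na.map (fun l => (l.1, pvDinc "col_out" l.2))
     else if PySem.Str.isIn "row_out" i then na.map (fun l => (l.1, pvDinc "row_out" l.2))
     else if PySem.Str.isIn "row_kernel" i then na.map (fun l => (l.1, pvDinc "row_kernel" l.2))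
     else if PySem.Str.isIn "col_kernel" i then na.map (fun l => (l.1, pvDinc "col_kernel" l.2))
     else na) =
    (match pvClassify i with
     | some k => na.map (fun l => (l.1, pvDinc k l.2))
     | none => na) := by
  simp only [pvClassify, pvKeys, List.find?]
  split_ifs <;> simp_all

-- A's whole loop, per layer: fold pvDinc over the classified keys of df_order.
theorem pv_foldA_shape (df : List String) (X : List (String × (List (String × List Int)))) :
    df.foldl (fun na i =>
      match pvClassify i with
      | some k => na.map (fun l => (l.1, pvDinc k l.2))
      | none => na) X =
    X.map (fun l => (l.1, (df.filterMap pvClassify).foldl (fun d k => pvDinc k d) l.2)) := by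
  induction df generalizing X with
  | nil => simp
  | cons i rest ih =>
    simp only [List.foldl_cons, List.filterMap_cons]
    cases h : pvClassify i with
    | none => simp [h, ih]
    | some k => simp [h, ih, List.map_map, Function.comp]

-- On a dict with distinct keys, pvDinc acts entrywise.
theorem pv_dinc_entrywise (k : String) (d : List (String × List Int))
    (hnd : (d.map Prod.fst).Nodup) :
    pvDinc k d = d.map (fun kv => if kv.1 = k then (kv.1, pvInc1 kv.2) else kv) := by
  induction d with
  | nil => rfl
  | cons p r ih =>
    simp only [List.map_cons, List.nodup_cons] at hnd
    simp only [pvDinc, List.map_cons]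
    by_cases h : p.1 = k
    · simp only [h, beq_self_eq_true, if_true]
      have : r.map (fun kv => if kv.1 = k then (kv.1, pvInc1 kv.2) else kv) = r := by
        conv_rhs => rw [← List.map_id r]
        apply List.map_congr_left
        intro kv hkv
        have : kv.1 ≠ k := by
          intro hk
          apply hnd.1
          rw [h, ← hk]
          exact List.mem_map_of_mem hkv
        simp [this]
      cases p with
      | mk p1 p2 => simp_all
    · have : (p.1 == k) = false := by simp [h]
      simp [this, h, ih hnd.2]

theorem pv_addAt1_zero (v : List Int) : pvAddAt1 0 v = v := by
  cases v with
  | nil => rfl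
  | cons a t => cases t <;> simp [pvAddAt1]

-- Folding pvDinc over a key sequence = add the key's multiplicity at position 1, entrywise.
theorem pv_foldl_dinc_count (ks : List String) (d : List (String × List Int))
    (hnd : (d.map Prod.fst).Nodup) :
    ks.foldl (fun d k => pvDinc k d) d =
    d.map (fun kv => (kv.1, pvAddAt1 ((ks.count kv.1 : Nat) : Int) kv.2)) := by
  induction ks generalizing d with
  | nil =>
    simp only [List.foldl_nil, List.count_nil, Nat.cast_zero]
    conv_lhs => rw [← List.map_id d]
    apply List.map_congr_left
    intro kv _
    simp [pv_addAt1_zero]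
  | cons k ks ih =>
    simp only [List.foldl_cons]
    rw [pv_dinc_entrywise k d hnd]
    have hnd' : ((d.map (fun kv => if kv.1 = k then (kv.1, pvInc1 kv.2) else kv)).map Prod.fst).Nodup := by
      have : (d.map (fun kv => if kv.1 = k then (kv.1, pvInc1 kv.2) else kv)).map Prod.fst = d.map Prod.fst := by
        rw [List.map_map]
        apply List.map_congr_left
        intro kv _
        by_cases h : kv.1 = k <;> simp [h]
      rw [this]; exact hnd
    rw [ih _ hnd', List.map_map]
    apply List.map_congr_left
    intro kv _
    by_cases h : kv.1 = k
    · subst h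
      simp only [Function.comp, if_pos rfl, List.count_cons_self]
      cases hv : kv.2 with
      | nil => simp [pvInc1, pvAddAt1]
      | cons a t =>
        cases t with
        | nil => simp [pvInc1, pvAddAt1]
        | cons b r =>
          simp only [pvInc1, pvAddAt1]
          push_cast
          ring_nf
    · have hne : ¬ k = kv.1 := fun hk => h hk.symm
      simp [Function.comp, List.count_cons, h, hne]

-- B's counter: getD of the counts dict is the multiplicity among the classified keys.
theorem pv_counts_getD (df : List String) (k : String) :
    (df.foldl (fun d i =>
        match pvClassify i with
        | some k => d.modify k 0 (· + 1)
        | none => d)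
      (PySem.Dict.ofList (pvKeys.map (fun k => (k, (0 : Int)))))).getD k 0 =
    ((df.filterMap pvClassify).count k : Int) := by
  have hfold : ∀ (d0 : PySem.Dict String Int),
      df.foldl (fun d i =>
        match pvClassify i with
        | some k => d.modify k 0 (· + 1)
        | none => d) d0 =
      (df.filterMap pvClassify).foldl (fun d k => d.modify k 0 (· + 1)) d0 := by
    induction df with
    | nil => intro d0; rfl
    | cons i rest ih =>
      intro d0
      simp only [List.foldl_cons, List.filterMap_cons]
      cases h : pvClassify i with
      | none => simp [h, ih]
      | some k => simp [h, ih]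
  rw [hfold]
  rw [PySem.Dict.getD_foldl_modify_add_one]
  have h0 : (PySem.Dict.ofList (pvKeys.map (fun k => (k, (0 : Int))))).getD k 0 = 0 := by
    by_cases h1 : k = "ch_out"
    · subst h1; decide
    · by_cases h2 : k = "ch_in"
      · subst h2; decide
      · by_cases h3 : k = "batch"
        · subst h3; decide
        · by_cases h4 : k = "col_out"
          · subst h4; decide
          · by_cases h5 : k = "row_out"
            · subst h5; decide
            · by_cases h6 : k = "row_kernel"
              · subst h6; decide
              · by_cases h7 : k = "col_kernel"
                · subst h7; decide
                · have hkeys : (PySem.Dict.ofList (pvKeys.map (fun k => (k, (0 : Int))))).keys = pvKeys := by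
                    decide
                  have hc : (PySem.Dict.ofList (pvKeys.map (fun k => (k, (0 : Int))))).contains k = false := by
                    rw [PySem.Dict.contains_eq_decide_mem_keys, hkeys]
                    simp [pvKeys, h1, h2, h3, h4, h5, h6, h7]
                  exact PySem.Dict.getD_of_not_contains _ _ hc
  rw [h0, zero_add]

-- ===== VERDICT (by name: the statement is the Claim_ definition above) =====
theorem gen_net_arch_spec : Claim_equal_gen_net_arch := by
  intro df_order dnn _hdom hpre
  unfold Spec_gen_net_arch gen_net_arch gen_net_arch_alt
  have hstep : (fun (net_arch : List (String × (List (String × List Int)))) (i : String) =>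
      if PySem.Str.isIn "ch_out" i then net_arch.map (fun l => (l.1, pvDinc "ch_out" l.2))
      else if PySem.Str.isIn "ch_in" i then net_arch.map (fun l => (l.1, pvDinc "ch_in" l.2))
      else if PySem.Str.isIn "batch" i then net_arch.map (fun l => (l.1, pvDinc "batch" l.2))
      else if PySem.Str.isIn "col_out" i then net_arch.map (fun l => (l.1, pvDinc "col_out" l.2))
      else if PySem.Str.isIn "row_out" i then net_arch.map (fun l => (l.1, pvDinc "row_out" l.2))
      else if PySem.Str.isIn "row_kernel" i then net_arch.map (fun l => (l.1, pvDinc "row_kernel" l.2))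
      else if PySem.Str.isIn "col_kernel" i then net_arch.map (fun l => (l.1, pvDinc "col_kernel" l.2))
      else net_arch) =
      (fun na i =>
        match pvClassify i with
        | some k => na.map (fun l => (l.1, pvDinc k l.2))
        | none => na) := by
    funext na i
    exact pv_stepA_eq na i
  rw [hstep, pv_foldA_shape]
  simp only [pv_counts_getD]
  apply List.map_congr_left
  intro l hl
  rw [pv_foldl_dinc_count _ _ (hpre.1 l hl)]
  have : ∀ kv : String × List Int, kv ∈ l.2 →
      ((kv.1, pvAddAt1 (((df_order.filterMap pvClassify).count kv.1 : Nat) : Int) kv.2) : String × List Int) =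
      (if (((df_order.filterMap pvClassify).count kv.1 : Nat) : Int) ≠ 0 then
        (kv.1, pvAddAt1 (((df_order.filterMap pvClassify).count kv.1 : Nat) : Int) kv.2)
      else kv) := by
    intro kv _
    by_cases hc : (((df_order.filterMap pvClassify).count kv.1 : Nat) : Int) = 0
    · simp [hc, pv_addAt1_zero]
    · rw [if_pos hc]
  simp only [List.map_congr_left this]
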